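-- pv_equiv track=rewrite | github.com/fabeezz/Licenta | backend/app/services/outfits/harmony.py | _are_analogous
-- ===== SOURCE A (Python) =====
-- _WHEEL: list[frozenset[str]] = [
--     frozenset({"red", "burgundy", "pink"}),
--     frozenset({"orange"}),
--     frozenset({"yellow"}),
--     frozenset({"green", "dark green"}),
--     frozenset({"cyan"}),
--     frozenset({"blue"}),
--     frozenset({"purple"}),
-- ]
--
-- def _wheel_pos(color: str) -> int | None:
--     for i, band in enumerate(_WHEEL):
--         if color in band:
--             return i
--     return None
--
-- def _are_analogous(colors: set[str]) -> bool:
--     if not colors: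
--         return True
--     positions = [_wheel_pos(c) for c in colors]
--     positions = [p for p in positions if p is not None]
--     if not positions:
--         return True
--     n = len(_WHEEL)
--     for i, a in enumerate(positions):
--         for b in positions[i + 1:]:
--             dist = min(abs(a - b), n - abs(a - b))
--             if dist > 1:
--                 return False
--     return True
-- ===== SOURCE B (Python) =====
-- _WHEEL: list[frozenset[str]] = [
--     frozenset({"red", "burgundy", "pink"}),
--     frozenset({"orange"}),
--     frozenset({"yellow"}),
--     frozenset({"green", "dark green"}),
--     frozenset({"cyan"}),
--     frozenset({"blue"}),
--     frozenset({"purple"}),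
-- ]
--
-- def _wheel_pos(color: str) -> int | None:
--     for i, band in enumerate(_WHEEL):
--         if color in band:
--             return i
--     return None
--
-- def _are_analogous(colors: set[str]) -> bool:
--     # Distinct wheel positions actually hit (off-wheel colors ignored).
--     pos = {p for p in (_wheel_pos(c) for c in colors) if p is not None}
--     if len(pos) <= 1:
--         return True
--     if len(pos) == 2:
--         a, b = pos
--         d = abs(a - b)
--         return d == 1 or d == len(_WHEEL) - 1
--     # 3+ distinct bands on a 7-band circle can never be pairwise adjacent.
--     return False
-- ===== Notes on version B (the rewrite author's own statement) =====
-- stated objective: simpler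
-- what changed: Replaces A's O(k^2) nested pairwise distance loop with a set of distinct wheel positions and a size case split: <=1 distinct position is trivially analogous, exactly 2 are analogous iff circularly adjacent, and 3+ distinct bands on a 7-band wheel can never be pairwise adjacent.
import Mathlib
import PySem

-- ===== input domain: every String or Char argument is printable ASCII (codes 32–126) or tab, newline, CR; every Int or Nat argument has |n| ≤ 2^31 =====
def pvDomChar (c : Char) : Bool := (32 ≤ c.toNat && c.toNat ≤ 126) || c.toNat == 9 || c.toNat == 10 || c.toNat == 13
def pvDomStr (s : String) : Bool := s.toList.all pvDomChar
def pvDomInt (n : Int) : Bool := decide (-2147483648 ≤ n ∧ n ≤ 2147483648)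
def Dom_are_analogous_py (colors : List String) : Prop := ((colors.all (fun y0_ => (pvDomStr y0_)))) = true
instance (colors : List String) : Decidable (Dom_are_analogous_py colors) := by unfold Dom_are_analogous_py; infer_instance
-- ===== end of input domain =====

-- B replaces A's nested pairwise circular-distance loop by a case split on the set of
-- distinct wheel positions (size ≤1 / =2 with adjacency test / ≥3 never analogous); simpler, same cost class.

-- ===== PORT A =====
-- the module constant _WHEEL (Python frozensets → PySem.Set String)
def pvWheel : List (PySem.Set String) :=
  [PySem.Set.ofList ["red", "burgundy", "pink"],
   PySem.Set.ofList ["orange"],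
   PySem.Set.ofList ["yellow"],
   PySem.Set.ofList ["green", "dark green"],
   PySem.Set.ofList ["cyan"],
   PySem.Set.ofList ["blue"],
   PySem.Set.ofList ["purple"]]

-- _wheel_pos: "for i, band in enumerate(_WHEEL): if color in band: return i; return None"
def pvWheelPosLoop : List (PySem.Set String) → Int → String → Option Int
  | [], _, _ => none
  | band :: rest, i, c => if PySem.Set.contains band c then some i else pvWheelPosLoop rest (i + 1) c

def pvWheelPos (c : String) : Option Int := pvWheelPosLoop pvWheel 0 c

-- A's nested loop: "for i, a in enumerate(positions): for b in positions[i+1:]: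
--   dist = min(abs(a-b), n-abs(a-b)); if dist > 1: return False"; here n = 7 = len(_WHEEL)
def pvPairLoop : List Int → Bool
  | [] => true
  | a :: rest =>
      if rest.any (fun b => decide (1 < min |a - b| (7 - |a - b|))) then false
      else pvPairLoop rest

def are_analogous_py (colors : List String) : Bool :=
  if colors = [] then true
  else
    let positions0 := colors.map pvWheelPos
    let positions := positions0.filterMap id
    if positions = [] then true
    else pvPairLoop positions

-- ===== PORT B =====
def are_analogous_py_alt (colors : List String) : Bool :=
  let pos : PySem.Set Int := PySem.Set.ofList ((colors.map pvWheelPos).filterMap id)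
  match pos with
  | [] => true
  | [_] => true
  | [a, b] => decide (|a - b| = 1 ∨ |a - b| = 7 - 1)
  | _ => false

-- ===== PRECONDITION & SPEC =====
def Spec_are_analogous_py (colors : List String) (out : Bool) : Prop := out = are_analogous_py_alt colors
instance (colors : List String) (out : Bool) : Decidable (Spec_are_analogous_py colors out) := by unfold Spec_are_analogous_py; infer_instance

-- ===== CLAIM (what is proved, stated in full; the proofs are below) =====
def Claim_equal_are_analogous_py : Prop := ∀ (colors : List String), Dom_are_analogous_py colors → Spec_are_analogous_py colors (are_analogous_py colors)

-- ===== LEMMAS AND PROOFS =====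

-- |x| as natAbs, so that omega can reason about the circular distances
theorem pvAbs (x : Int) : |x| = ((x.natAbs : Int)) := Int.abs_eq_natAbs x

-- any position returned by _wheel_pos lies on the 7-band wheel
theorem pvWheelPos_bounds (c : String) (p : Int) (h : pvWheelPos c = some p) : 0 ≤ p ∧ p < 7 := by
  unfold pvWheelPos pvWheel at h
  simp only [pvWheelPosLoop] at h
  split_ifs at h <;> (injection h with h; omega)

-- A's loop is the decidable pairwise circular-distance check
theorem pvPairLoop_iff (l : List Int) :
    pvPairLoop l = true ↔ ∀ a ∈ l, ∀ b ∈ l, min |a - b| (7 - |a - b|) ≤ 1 := by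
  induction l with
  | nil => simp [pvPairLoop]
  | cons a rest ih =>
      simp only [pvPairLoop]
      cases hany : rest.any (fun b => decide (1 < min |a - b| (7 - |a - b|))) with
      | true =>
          simp only [if_true]
          constructor
          · intro h; cases h
          · intro h
            rcases List.any_eq_true.mp hany with ⟨b, hb, hlt⟩
            have := h a (by simp) b (by simp [hb])
            simp at hlt; omega
      | false =>
          simp only [Bool.false_eq_true, if_false]
          rw [ih]
          have hall : ∀ b ∈ rest, min |a - b| (7 - |a - b|) ≤ 1 := by
            intro b hb
            have := List.any_eq_false.mp hany b hb
            simp at this; omega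
          constructor
          · intro h x hx y hy
            rcases List.mem_cons.mp hx with hx' | hx' <;> rcases List.mem_cons.mp hy with hy' | hy'
            · subst hx'; subst hy'; simp
            · subst hx'; exact hall y hy'
            · rw [hy']
              have := hall x hx'
              have habs := abs_sub_comm a x
              omega
            · exact h x hx' y hy'
          · intro h x hx y hy
            exact h x (List.mem_cons_of_mem _ hx) y (List.mem_cons_of_mem _ hy)

-- the core equivalence, on the list of on-wheel positions
theorem pvKey (l : List Int) (hbnd : ∀ p ∈ l, 0 ≤ p ∧ p < 7) :
    (if l = [] then true else pvPairLoop l) =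
      (match PySem.Set.ofList l with
       | [] => true
       | [_] => true
       | [a, b] => decide (|a - b| = 1 ∨ |a - b| = 7 - 1)
       | _ => false) := by
  have hmem : ∀ x, x ∈ PySem.Set.ofList l ↔ x ∈ l := fun x => PySem.Set.mem_ofList l x
  have hnd : (PySem.Set.ofList l).Nodup := PySem.Set.nodup_ofList l
  rcases hs : PySem.Set.ofList l with _ | ⟨a, _ | ⟨b, _ | ⟨c, rest⟩⟩⟩ <;> rw [hs] at hmem hnd
  · -- empty set: l = [], A returns True via its guard
    have hnil : l = [] := by
      rw [List.eq_nil_iff_forall_not_mem]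
      intro x hx
      exact absurd ((hmem x).mpr hx) (List.not_mem_nil)
    rw [if_pos hnil]
  · -- one distinct position: every pair has distance 0, A's loop returns True
    have hloop : pvPairLoop l = true := by
      rw [pvPairLoop_iff]
      intro x hx y hy
      have hx' : x = a := by simpa using (hmem x).mpr hx
      have hy' : y = a := by simpa using (hmem y).mpr hy
      subst hx'; subst hy'; simp
    split_ifs <;> simp [hloop]
  · -- two distinct positions a ≠ b: A's loop ↔ circular adjacency of a and b
    have ha : a ∈ l := (hmem a).mp (by simp)
    have hb : b ∈ l := (hmem b).mp (by simp)
    have hab : a ≠ b := by simpa using hnd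
    have hpne : l ≠ [] := fun h => by rw [h] at ha; exact absurd ha (List.not_mem_nil)
    rw [if_neg hpne]
    have habnd := hbnd a ha
    have hbbnd := hbnd b hb
    have htwo : ∀ x ∈ l, x = a ∨ x = b := fun x hx => by simpa using (hmem x).mpr hx
    show pvPairLoop l = decide (|a - b| = 1 ∨ |a - b| = 7 - 1)
    by_cases hadj : |a - b| = 1 ∨ |a - b| = 7 - 1
    · rw [decide_eq_true hadj]
      rw [pvPairLoop_iff]
      intro x hx y hy
      have hxy : |x - y| = |a - b| ∨ |x - y| = |b - a| ∨ |x - y| = 0 := by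
        rcases htwo x hx with rfl | rfl <;> rcases htwo y hy with rfl | rfl <;>
          simp [abs_sub_comm]
      have habs : |b - a| = |a - b| := abs_sub_comm b a
      rw [pvAbs (a-b), pvAbs (b-a), pvAbs (x-y)] at *
      omega
    · rw [decide_eq_false hadj]
      cases hl : pvPairLoop l with
      | false => rfl
      | true =>
          exfalso
          have := (pvPairLoop_iff l).mp hl a ha b hb
          rw [pvAbs (a-b)] at this hadj
          omega
  · -- three or more distinct positions on a 7-band wheel: never pairwise adjacent
    have ha : a ∈ l := (hmem a).mp (by simp)
    have hb : b ∈ l := (hmem b).mp (by simp)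
    have hc : c ∈ l := (hmem c).mp (by simp)
    have hpne : l ≠ [] := fun h => by rw [h] at ha; exact absurd ha (List.not_mem_nil)
    rw [if_neg hpne]
    have hnd' : a ≠ b ∧ a ≠ c ∧ b ≠ c := by
      simp [List.nodup_cons] at hnd
      tauto
    have habnd := hbnd a ha
    have hbbnd := hbnd b hb
    have hcbnd := hbnd c hc
    show pvPairLoop l = false
    cases hl : pvPairLoop l with
    | false => rfl
    | true =>
        exfalso
        have h1 := (pvPairLoop_iff l).mp hl a ha b hb
        have h2 := (pvPairLoop_iff l).mp hl a ha c hc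
        have h3 := (pvPairLoop_iff l).mp hl b hb c hc
        rw [pvAbs (a-b)] at h1
        rw [pvAbs (a-c)] at h2
        rw [pvAbs (b-c)] at h3
        omega

-- ===== VERDICT (by name: the statement is the Claim_ definition above) =====
theorem are_analogous_py_spec : Claim_equal_are_analogous_py := by
  intro colors _
  unfold Spec_are_analogous_py are_analogous_py are_analogous_py_alt
  show (if colors = [] then true
        else if (colors.map pvWheelPos).filterMap id = [] then true
        else pvPairLoop ((colors.map pvWheelPos).filterMap id)) = _
  have hbnd : ∀ p ∈ (colors.map pvWheelPos).filterMap id, 0 ≤ p ∧ p < 7 := by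
    intro p hp
    rcases List.mem_filterMap.mp hp with ⟨o, ho, hoeq⟩
    rcases List.mem_map.mp ho with ⟨c, _, rfl⟩
    exact pvWheelPos_bounds c p hoeq
  by_cases hc : colors = []
  · subst hc; rfl
  · rw [if_neg hc]
    exact pvKey _ hbnd
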